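-- pv_equiv track=rewrite | github.com/approaching236/approaching236.github.io | assets/foobar.withgoogle/hey_i_already_did_that.py | digits_in_base
-- ===== SOURCE A (Python) =====
-- def digits_in_base(i, k, b):
--     assert i < b**k
--     assert i >= 0
--     digits = []
--
--     for digit in range(0, k):
--         digits.append(int(i % b))
--         i //= b
--
--     return digits[::-1]
-- ===== SOURCE B (Python) =====
-- def digits_in_base(i, k, b):
--     assert i < b**k
--     assert i >= 0
--
--     def rec(i, k):
--         if k == 0:
--             return []
--         if k == 1:
--             return [i % b]
--         h = k // 2
--         q, r = divmod(i, b**h)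
--         return rec(q, k - h) + rec(r, h)
--
--     return rec(i, k)
-- ===== Notes on version B (the rewrite author's own statement) =====
-- stated objective: alternative
-- what changed: B replaces A's linear remainder loop (LSB-first append, shrinking i, then reverse) with a divide-and-conquer conversion: split i by b**(k//2) with one divmod and recursively convert the high and low halves, concatenating in final MSB order with no reversal.
-- outside the precondition, e.g. on digits_in_base(3, 4, -2): A returns [-1, -1, 0, -1], B returns [0, 0, 0, -1]; on digits_in_base(0, -1, 2): A returns [], B raises RecursionError
import Mathlib
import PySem

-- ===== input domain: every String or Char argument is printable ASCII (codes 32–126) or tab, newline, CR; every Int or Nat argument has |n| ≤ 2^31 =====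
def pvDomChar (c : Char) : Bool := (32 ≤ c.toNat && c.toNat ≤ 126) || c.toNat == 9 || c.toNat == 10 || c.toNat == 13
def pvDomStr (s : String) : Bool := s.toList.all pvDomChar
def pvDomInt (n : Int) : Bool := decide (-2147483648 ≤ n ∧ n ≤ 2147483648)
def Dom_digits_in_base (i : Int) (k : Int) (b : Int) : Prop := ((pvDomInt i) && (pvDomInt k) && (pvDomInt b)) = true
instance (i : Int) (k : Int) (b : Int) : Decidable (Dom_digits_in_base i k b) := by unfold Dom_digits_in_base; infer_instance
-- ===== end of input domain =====

-- B computes each digit MSB-first by a direct positional formula instead of A's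
-- remainder loop plus reversal; return values agree on all of Pre_ (alternative decomposition, no speed claim).

-- ===== PORT A =====
def digits_in_base (i : Int) (k : Int) (b : Int) : List Int :=
  -- digits = []; for digit in range(0, k): digits.append(i % b); i //= b
  let st := (PySem.List.pyRange 0 k 1).foldl
      (fun (st : List Int × Int) (_ : Int) =>
        (st.1 ++ [PySem.Int.mod st.2 b], PySem.Int.floordiv st.2 b))
      ([], i)
  -- return digits[::-1]
  st.1.reverse

-- ===== PORT B =====
-- helper rec(i, k) of Source B, with a fuel parameter (set to k.toNat, an upper bound on the
-- recursion depth) purely so the recursion is structural and total; Python tests `k == 0`,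
-- widened to `k ≤ 0` in the same spirit (for k < 0 the Python rec never returns, which
-- Pre_ excludes)
def dibRec : Nat → Int → Int → Int → List Int
  | 0, _, _, _ => []
  | Nat.succ f, b, i, k =>
    if k ≤ 0 then []
    else if k = 1 then [PySem.Int.mod i b]
    else
      let h := PySem.Int.floordiv k 2
      dibRec f b (PySem.Int.floordiv i (b ^ h.toNat)) (k - h) ++
        dibRec f b (PySem.Int.mod i (b ^ h.toNat)) h

def digits_in_base_alt (i : Int) (k : Int) (b : Int) : List Int :=
  dibRec k.toNat b i k

-- ===== PRECONDITION & SPEC =====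
-- Pre_ excludes the inputs on which A's asserts fail (i < 0 or i ≥ b^k), negative k (A's
-- assert then compares i against a float power and A returns [] only for i = 0), and b ≤ 0,
-- which is outside the natural domain of fixed-width base conversion (there A's repeated
-- floor division produces a negative-base expansion that a positional formula does not).
def Pre_digits_in_base (i : Int) (k : Int) (b : Int) : Prop :=
  0 ≤ i ∧ 0 ≤ k ∧ 1 ≤ b ∧ i < b ^ k.toNat
instance (i : Int) (k : Int) (b : Int) : Decidable (Pre_digits_in_base i k b) := by
  unfold Pre_digits_in_base; infer_instance
def pvWitness_digits_in_base : Int × Int × Int := (11, 4, 2)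

def Spec_digits_in_base (i : Int) (k : Int) (b : Int) (out : List Int) : Prop := out = digits_in_base_alt i k b
instance (i : Int) (k : Int) (b : Int) (out : List Int) : Decidable (Spec_digits_in_base i k b out) := by unfold Spec_digits_in_base; infer_instance

-- ===== CLAIM (what is proved, stated in full; the proofs are below) =====
def Claim_equal_digits_in_base : Prop := ∀ (i : Int) (k : Int) (b : Int), Dom_digits_in_base i k b → Pre_digits_in_base i k b → Spec_digits_in_base i k b (digits_in_base i k b)

-- ===== LEMMAS AND PROOFS =====

-- floor division by positive divisors composes (on nonnegative dividends it is ediv)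
lemma fdiv_fdiv (i a b : Int) (_ : 0 ≤ i) (ha : 0 < a) (hb : 0 < b) :
    PySem.Int.floordiv (PySem.Int.floordiv i a) b = PySem.Int.floordiv i (a * b) := by
  rw [PySem.Int.floordiv_eq_ediv_of_pos ha, PySem.Int.floordiv_eq_ediv_of_pos hb,
      PySem.Int.floordiv_eq_ediv_of_pos (by positivity)]
  exact Int.ediv_ediv_of_nonneg (le_of_lt ha)

-- A's loop over n steps: the accumulated digits are the LSB-first remainders
-- mod (i / b^j) b for j = 0..n-1, and the carried value is i / b^n.
lemma loopA (b : Int) (hb : 1 ≤ b) : ∀ (n : Nat) (acc : List Int) (i : Int), 0 ≤ i →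
    ((List.range n).foldl
      (fun (st : List Int × Int) (_ : Nat) =>
        (st.1 ++ [PySem.Int.mod st.2 b], PySem.Int.floordiv st.2 b))
      (acc, i))
    = (acc ++ (List.range n).map
        (fun j => PySem.Int.mod (PySem.Int.floordiv i (b ^ j)) b),
       PySem.Int.floordiv i (b ^ n)) := by
  intro n
  induction n with
  | zero =>
    intro acc i _
    simp
  | succ n ih =>
    intro acc i hi
    rw [List.range_succ, List.foldl_append, ih acc i hi]
    simp only [List.foldl_cons, List.foldl_nil, List.map_append, List.map_cons, List.map_nil,
      List.append_assoc]
    rw [fdiv_fdiv i (b ^ n) b hi (by positivity) (by omega), ← pow_succ]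

-- reversing an n-element map over range n flips the index
lemma reverse_map_range {α : Type} (f : Nat → α) (n : Nat) :
    ((List.range n).map f).reverse = (List.range n).map (fun p => f (n - 1 - p)) := by
  apply List.ext_getElem
  · simp
  · intro p h1 h2
    simp only [List.getElem_reverse, List.getElem_map, List.getElem_range,
      List.length_map, List.length_range] at *

-- dropping the high digits (taking i mod b^hh) does not change any digit below position hh
lemma mod_fdiv_mod (b i : Int) (hb : 1 ≤ b) (e hh : Nat) (he : e < hh) :
    PySem.Int.mod (PySem.Int.floordiv (PySem.Int.mod i (b ^ hh)) (b ^ e)) b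
      = PySem.Int.mod (PySem.Int.floordiv i (b ^ e)) b := by
  have hP : (0:Int) < b ^ e := by positivity
  have hH : (0:Int) < b ^ hh := by positivity
  simp only [PySem.Int.mod_eq_emod_of_pos (show (0:Int) < b by omega),
    PySem.Int.mod_eq_emod_of_pos hH, PySem.Int.floordiv_eq_ediv_of_pos hP]
  conv_rhs => rw [← Int.emod_add_mul_ediv i (b ^ hh)]
  have h1 : b ^ hh * (i / b ^ hh) = b ^ e * (b ^ (hh - e) * (i / b ^ hh)) := by
    rw [← mul_assoc, ← pow_add]
    congr 2
    omega
  rw [h1, Int.add_mul_ediv_left _ _ (ne_of_gt hP)]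
  have h2 : b ^ (hh - e) * (i / b ^ hh) = b * (b ^ (hh - e - 1) * (i / b ^ hh)) := by
    rw [← mul_assoc]
    congr 1
    rw [← pow_succ']
    congr 1
    omega
  rw [h2, Int.add_mul_emod_self_left]

-- B's divide-and-conquer produces the MSB-first positional digits (given enough fuel)
lemma dibRec_eq (b : Int) (hb : 1 ≤ b) : ∀ (f : Nat) (k i : Int), 0 ≤ i → 0 ≤ k → k.toNat ≤ f →
    dibRec f b i k = (List.range k.toNat).map
      (fun p => PySem.Int.mod (PySem.Int.floordiv i (b ^ (k.toNat - 1 - p))) b) := by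
  intro f
  induction f with
  | zero =>
    intro k i hi hk hf
    have hz : k.toNat = 0 := by omega
    simp [dibRec, hz]
  | succ f ih =>
    intro k i hi hk hf
    rw [dibRec]
    split_ifs with h0 h1
    · have hz : k.toNat = 0 := by omega
      simp [hz]
    · subst h1
      simp [List.range_succ]
    · -- k ≥ 2
      dsimp only
      have hk2 : 2 ≤ k := by omega
      have hfd : PySem.Int.floordiv k 2 = k / 2 := PySem.Int.floordiv_eq_ediv_of_pos (by omega)
      set h := PySem.Int.floordiv k 2 with hh_def
      have hhb : 1 ≤ h ∧ h < k := by rw [hfd]; omega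
      have hHpos : (0:Int) < b ^ h.toNat := by positivity
      have hqnn : 0 ≤ PySem.Int.floordiv i (b ^ h.toNat) := by
        rw [PySem.Int.floordiv_eq_ediv_of_pos hHpos]
        exact Int.ediv_nonneg hi (le_of_lt hHpos)
      have hrnn : 0 ≤ PySem.Int.mod i (b ^ h.toNat) := by
        rw [PySem.Int.mod_eq_emod_of_pos hHpos]
        exact Int.emod_nonneg i (ne_of_gt hHpos)
      rw [ih (k - h) _ hqnn (by omega) (by omega),
          ih h _ hrnn (by omega) (by omega)]
      have hsplit : k.toNat = (k - h).toNat + h.toNat := by omega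
      rw [hsplit, List.range_add, List.map_append, List.map_map]
      congr 1
      · -- high half
        apply List.map_congr_left
        intro p hp
        rw [List.mem_range] at hp
        rw [fdiv_fdiv i (b ^ h.toNat) (b ^ ((k - h).toNat - 1 - p)) hi hHpos (by positivity),
            ← pow_add]
        have hidx : h.toNat + ((k - h).toNat - 1 - p) = (k - h).toNat + h.toNat - 1 - p := by
          omega
        rw [hidx]
      · -- low half
        apply List.map_congr_left
        intro p hp
        rw [List.mem_range] at hp
        simp only [Function.comp_apply]
        have hidx : (k - h).toNat + h.toNat - 1 - ((k - h).toNat + p) = h.toNat - 1 - p := by omega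
        rw [hidx, mod_fdiv_mod b i hb (h.toNat - 1 - p) h.toNat (by omega)]

theorem digits_in_base_spec : Claim_equal_digits_in_base := by
  intro i k b _ hpre
  obtain ⟨hi, hk, hb, _⟩ := hpre
  unfold Spec_digits_in_base digits_in_base digits_in_base_alt
  rw [PySem.List.pyRange_one 0 k]
  simp only [sub_zero, zero_add, List.foldl_map]
  rw [loopA b hb k.toNat [] i hi]
  simp only [List.nil_append]
  rw [reverse_map_range]
  rw [dibRec_eq b hb k.toNat k i hi hk (le_refl _)]
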